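-- pv_equiv track=rewrite | github.com/gracobjo/proyecto_transporte_global_standalone | scripts/nifi_iniciar_pipeline_simlog.py | _merge_effective_state
-- ===== SOURCE A (Python) =====
-- _STATE_PRIORITY: tuple[str, ...] = (
--     "RUNNING",
--     "VALIDATING",
--     "LOADING",
--     "STARTING",
--     "STOPPING",
--     "DISABLED",
--     "STOPPED",
-- )
--
-- def _merge_effective_state(api_st: str, run_status_hint: str | None) -> str:
--     parts = {p for p in (api_st, run_status_hint or "") if p and str(p).strip()}
--     if not parts:
--         return api_st or ""
--     for p in _STATE_PRIORITY:
--         if p in parts: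
--             return p
--     return api_st or ""
-- ===== SOURCE B (Python) =====
-- _STATE_PRIORITY: tuple[str, ...] = (
--     "RUNNING",
--     "VALIDATING",
--     "LOADING",
--     "STARTING",
--     "STOPPING",
--     "DISABLED",
--     "STOPPED",
-- )
--
-- _RANK = {p: i for i, p in enumerate(_STATE_PRIORITY)}
--
--
-- def _merge_effective_state(api_st: str, run_status_hint: str | None) -> str:
--     # Scan the candidates once, keeping the one with the smallest priority rank.
--     missing = len(_STATE_PRIORITY)
--     best, best_rank = None, missing
--     for c in (api_st, run_status_hint or ""):
--         if c and str(c).strip():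
--             r = _RANK.get(c, missing)
--             if r < best_rank:
--                 best, best_rank = c, r
--     if best_rank < missing:
--         return best
--     return api_st or ""
-- ===== Notes on version B (the rewrite author's own statement) =====
-- stated objective: alternative
-- what changed: Instead of building a set of candidates and scanning the priority tuple for the first member, B builds a rank index of the priorities once and scans the two candidates keeping the one of smallest rank.
import Mathlib
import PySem

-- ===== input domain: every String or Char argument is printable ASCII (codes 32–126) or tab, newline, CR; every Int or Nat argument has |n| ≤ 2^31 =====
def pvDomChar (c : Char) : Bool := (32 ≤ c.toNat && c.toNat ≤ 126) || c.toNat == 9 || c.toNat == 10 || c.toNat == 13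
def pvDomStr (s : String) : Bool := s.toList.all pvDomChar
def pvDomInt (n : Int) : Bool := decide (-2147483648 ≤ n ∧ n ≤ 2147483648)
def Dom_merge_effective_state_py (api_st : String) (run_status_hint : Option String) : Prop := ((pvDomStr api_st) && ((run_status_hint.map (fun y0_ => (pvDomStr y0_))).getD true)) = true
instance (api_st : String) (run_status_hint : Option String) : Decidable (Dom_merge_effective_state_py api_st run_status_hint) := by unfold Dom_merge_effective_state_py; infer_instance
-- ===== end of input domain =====

-- B replaces A's scan of the priority tuple (with a set membership test) by a one-pass
-- minimum-rank scan of the two candidates against a precomputed rank table; same values.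

-- ===== PORT A =====
-- module constant _STATE_PRIORITY
def pvPrios : List String :=
  ["RUNNING", "VALIDATING", "LOADING", "STARTING", "STOPPING", "DISABLED", "STOPPED"]

-- the candidate filter `p and str(p).strip()` (truthiness of p and of its strip)
def pvKeep (p : String) : Bool := !(p == "") && !(PySem.Str.strip p == "")

def merge_effective_state_py (api_st : String) (run_status_hint : Option String) : String :=
  let parts : PySem.Set String :=
    PySem.Set.ofList (([api_st, run_status_hint.getD ""]).filter pvKeep)
  if parts = ([] : List String) then (if api_st == "" then "" else api_st)
  else
    -- for p in _STATE_PRIORITY: if p in parts: return p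
    match pvPrios.find? (fun p => PySem.Set.contains parts p) with
    | some p => p
    | none => (if api_st == "" then "" else api_st)

-- ===== PORT B =====
-- module constant _RANK = {p: i for i, p in enumerate(_STATE_PRIORITY)}
def pvRankDict : PySem.Dict String Int :=
  (PySem.List.enumerate pvPrios 0).foldl (fun d ip => d.insert ip.2 ip.1) PySem.Dict.empty

def merge_effective_state_py_alt (api_st : String) (run_status_hint : Option String) : String :=
  let missing : Int := (pvPrios.length : Int)
  let st :=
    ([api_st, run_status_hint.getD ""]).foldl
      (fun (st : Option String × Int) c =>
        if pvKeep c then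
          let r := PySem.Dict.getD pvRankDict c missing
          if r < st.2 then (some c, r) else st
        else st)
      (none, missing)
  if st.2 < missing then st.1.getD ""   -- best is some whenever best_rank < missing
  else (if api_st == "" then "" else api_st)

-- ===== PRECONDITION & SPEC =====
def Spec_merge_effective_state_py (api_st : String) (run_status_hint : Option String) (out : String) : Prop := out = merge_effective_state_py_alt api_st run_status_hint
instance (api_st : String) (run_status_hint : Option String) (out : String) : Decidable (Spec_merge_effective_state_py api_st run_status_hint out) := by unfold Spec_merge_effective_state_py; infer_instance

-- ===== CLAIM (what is proved, stated in full; the proofs are below) =====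
def Claim_equal_merge_effective_state_py : Prop := ∀ (api_st : String) (run_status_hint : Option String), Dom_merge_effective_state_py api_st run_status_hint → Spec_merge_effective_state_py api_st run_status_hint (merge_effective_state_py api_st run_status_hint)

-- ===== LEMMAS AND PROOFS =====

-- rank of s in l: index of first occurrence, l.length if absent
def pvRank : List String → String → Nat
  | [], _ => 0
  | h :: t, s => if h = s then 0 else pvRank t s + 1

lemma pvRank_le (l : List String) (s : String) : pvRank l s ≤ l.length := by
  induction l with
  | nil => simp [pvRank]
  | cons h t ih => by_cases hh : h = s <;> simp [pvRank, hh] <;> omega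

lemma pvDict_rank (c : String) :
    PySem.Dict.getD pvRankDict c ((pvPrios.length : Int)) = (pvRank pvPrios c : Int) := by
  have h : pvRankDict = PySem.Dict.mk
      [("RUNNING", 0), ("VALIDATING", 1), ("LOADING", 2), ("STARTING", 3),
       ("STOPPING", 4), ("DISABLED", 5), ("STOPPED", 6)] := by rfl
  simp only [h, PySem.Dict.getD_eq_get?_getD, PySem.Dict.get?_mk_cons, pvPrios, pvRank]
  split_ifs <;> simp_all <;> rfl

lemma pvFindOne (l : List String) (a : String) :
    l.find? (fun p => PySem.Set.contains [a] p) =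
      if pvRank l a < l.length then some a else none := by
  induction l with
  | nil => simp [pvRank]
  | cons h t ih =>
    by_cases hh : h = a
    · subst hh
      simp [List.find?, PySem.Set.contains, pvRank]
    · have hc : PySem.Set.contains [a] h = false := by
        simp [PySem.Set.contains, hh]
      simp only [List.find?, hc, ih, pvRank, if_neg hh, List.length_cons]
      simp [Nat.add_lt_add_iff_right]

lemma pvFindTwo (l : List String) (a b : String) (hab : a ≠ b) :
    l.find? (fun p => PySem.Set.contains [a, b] p) =
      if pvRank l b < pvRank l a then (if pvRank l b < l.length then some b else none)
      else (if pvRank l a < l.length then some a else none) := by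
  induction l with
  | nil => simp [pvRank]
  | cons h t ih =>
    by_cases ha : h = a
    · subst ha
      have hb' : h ≠ b := hab
      simp [List.find?, PySem.Set.contains, pvRank, hb']
    · by_cases hb : h = b
      · subst hb
        have ha' : ¬ h = a := fun hh => ha hh
        simp [List.find?, PySem.Set.contains, pvRank, ha']
      · have hc : PySem.Set.contains [a, b] h = false := by
          simp [PySem.Set.contains, ha, hb]
        simp only [List.find?, hc, ih, pvRank, if_neg ha, if_neg hb, List.length_cons]
        simp [Nat.add_lt_add_iff_right]

lemma pv_len7 : pvPrios.length = 7 := by rfl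

-- ===== VERDICT (by name: the statement is the Claim_ definition above) =====
set_option maxHeartbeats 1000000 in
theorem merge_effective_state_py_spec : Claim_equal_merge_effective_state_py := by
  intro a h _
  unfold Spec_merge_effective_state_py merge_effective_state_py merge_effective_state_py_alt
  set b := h.getD "" with hbdef
  by_cases ka : pvKeep a <;> by_cases kb : pvKeep b
  · -- both candidates kept
    by_cases hab : a = b
    · simp only [List.filter, ka, kb, List.filter_nil, PySem.Set.ofList]
      simp only [List.foldl, ka, kb, hab, pvDict_rank]
      rw [← hab]
      have hone : PySem.Set.add (PySem.Set.add PySem.Set.empty a) a = [a] := by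
        simp [PySem.Set.add, PySem.Set.empty, PySem.Set.contains]
      rw [hone, pvFindOne pvPrios a]
      have h7a := pvRank_le pvPrios a
      simp only [pv_len7] at h7a ⊢
      rw [if_neg (List.cons_ne_nil _ _)]
      simp only [if_true]
      split_ifs <;> first | rfl | omega | exact ‹False›.elim
    · simp only [List.filter, ka, kb, List.filter_nil]
      have hofl : PySem.Set.ofList [a, b] = [a, b] := by
        have hba : ¬ b = a := fun hh => hab hh.symm
        simp [PySem.Set.ofList, PySem.Set.add, PySem.Set.contains, hba]
      rw [hofl, pvFindTwo pvPrios a b hab]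
      simp only [List.foldl, ka, kb, if_pos rfl, pvDict_rank]
      have h7a := pvRank_le pvPrios a
      have h7b := pvRank_le pvPrios b
      simp only [pv_len7] at h7a h7b ⊢
      split_ifs <;> first | rfl | omega | exact ‹False›.elim
  · -- only a kept
    simp only [List.filter, ka, kb, List.filter_nil]
    have hofl : PySem.Set.ofList [a] = [a] := by simp [PySem.Set.ofList, PySem.Set.add]
    rw [hofl, pvFindOne pvPrios a]
    simp only [List.foldl, ka, kb, if_pos rfl, pvDict_rank]
    have h7a := pvRank_le pvPrios a
    have h7b := pvRank_le pvPrios b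
    simp only [pv_len7] at h7a h7b ⊢
    rw [if_neg (List.cons_ne_nil _ _)]
    simp only [if_true]
    split_ifs <;> first | rfl | omega | exact ‹False›.elim
  · -- only b kept
    simp only [List.filter, ka, kb, List.filter_nil]
    have hofl : PySem.Set.ofList [b] = [b] := by simp [PySem.Set.ofList, PySem.Set.add]
    rw [hofl, pvFindOne pvPrios b]
    simp only [List.foldl, ka, kb, if_pos rfl, pvDict_rank]
    have h7a := pvRank_le pvPrios a
    have h7b := pvRank_le pvPrios b
    simp only [pv_len7] at h7a h7b ⊢
    rw [if_neg (List.cons_ne_nil _ _)]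
    simp only [if_true]
    split_ifs <;> first | rfl | omega | exact ‹False›.elim
  · -- none kept
    simp only [List.filter, ka, kb, List.filter_nil]
    simp [List.foldl, ka, kb]
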